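-- pv_equiv track=rewrite | github.com/jmingk/Certi | 0420/N.py | solution
-- ===== SOURCE A (Python) =====
-- def solution(N, number):
--     if N == number:
--         return 1
--
--     dp = []
--     for _ in range(9):
--         dp.append([])
--
--     for i in range(1, 9):
--         dp[i].append(int(str(N) * i))
--
--         for j in range(1, i):
--             for x in dp[j]:
--                 for y in dp[i - j]:
--                     dp[i].append(x + y)
--                     dp[i].append(x - y)
--                     dp[i].append(x * y)
--                     if y != 0:
--                         dp[i].append(x // y)
--
--         dp[i] = list(set(dp[i]))
--
--         if number in dp[i]:
--             return i
--
--     return -1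
-- ===== SOURCE B (Python) =====
-- def solution(N, number):
--     if N == number:
--         return 1
--
--     def reach(i):
--         # set of values formed from exactly i copies of N
--         vals = {int(str(N) * i)}
--         for j in range(1, i):
--             for x in reach(j):
--                 for y in reach(i - j):
--                     vals.add(x + y)
--                     vals.add(x - y)
--                     vals.add(x * y)
--                     if y != 0:
--                         vals.add(x // y)
--         return vals
--
--     for i in range(1, 9):
--         if number in reach(i):
--             return i
--     return -1
-- ===== Notes on version B (the rewrite author's own statement) =====
-- stated objective: alternative
-- what changed: Replaces A's bottom-up 9-slot dp table of lists (deduplicated with set() at the end of each level) with a recursive function reach(i) that directly builds the set of values formed from exactly i copies of N; the top level returns the first i in 1..8 with number in reach(i).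
-- outside the precondition, e.g. on solution(-3, 5): A raises ValueError, B raises ValueError
import Mathlib
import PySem

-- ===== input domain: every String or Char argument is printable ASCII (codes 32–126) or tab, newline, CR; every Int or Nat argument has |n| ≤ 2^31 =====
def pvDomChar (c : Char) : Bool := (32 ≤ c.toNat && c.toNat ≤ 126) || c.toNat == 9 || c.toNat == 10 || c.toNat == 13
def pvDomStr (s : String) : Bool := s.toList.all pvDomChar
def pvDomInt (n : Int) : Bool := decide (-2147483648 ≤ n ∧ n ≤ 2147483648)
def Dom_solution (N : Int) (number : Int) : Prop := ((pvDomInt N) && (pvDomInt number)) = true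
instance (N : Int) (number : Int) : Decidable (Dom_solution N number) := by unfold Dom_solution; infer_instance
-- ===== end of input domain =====

-- B replaces A's bottom-up 9-slot dp table (lists deduplicated by set() at the end of each level)
-- with a recursive function reach(i) that builds the set of values from i copies of N directly; same
-- combining rules, so the per-level sets are identical.  Objective: alternative decomposition (not faster).

-- ===== PORT A =====
-- int(str(N) * i): exact hand port (string repetition = flatten of replicate); the `.getD 0`
-- default is never reached under Pre_solution (N ≥ 0 makes int() succeed).
def pvRepA (N : Int) (i : Int) : Int :=
  (PySem.Int.ofChars? (List.flatten (List.replicate i.toNat (PySem.Int.toChars N)))).getD 0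

-- the body of A's i-th outer iteration: dp[i] before dedup (A never reads dp[i] while building it)
def pvLevelA (N : Int) (dp : List (List Int)) (i : Int) : List Int :=
  (PySem.List.pyRange 1 i 1).foldl (fun acc j =>
    (PySem.List.pyGetD dp j []).foldl (fun accx x =>
      (PySem.List.pyGetD dp (i - j) []).foldl (fun accy y =>
        let accy := accy ++ [x + y] ++ [x - y] ++ [x * y]
        if y ≠ 0 then accy ++ [PySem.Int.floordiv x y] else accy) accx) acc)
    [pvRepA N i]

-- A's outer loop `for i in range(1, 9)` with early return; dp[i] = list(set(...)) is modelled as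
-- PySem.Set.ofList (the returned level index depends only on set membership, not hash order)
def pvLoopA (N : Int) (number : Int) : List Int → List (List Int) → Int
  | [], _ => -1
  | i :: rest, dp =>
    let lvl : PySem.Set Int := PySem.Set.ofList (pvLevelA N dp i)
    if number ∈ lvl then i
    else pvLoopA N number rest (PySem.List.pySetD dp i lvl)

def solution (N : Int) (number : Int) : Int :=
  if N = number then 1
  else pvLoopA N number (PySem.List.pyRange 1 9 1)
    ((List.range 9).foldl (fun d _ => d ++ [([] : List Int)]) [])

-- ===== PORT B =====
def pvRepB (N : Int) (i : Nat) : Int :=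
  (PySem.Int.ofChars? (List.flatten (List.replicate i (PySem.Int.toChars N)))).getD 0

-- reach(i): the set of values obtainable from exactly i copies of N
def pvReach (N : Int) : Nat → PySem.Set Int
  | i =>
    (List.range' 1 (i - 1)).attach.foldl (fun acc jh =>
      (pvReach N jh.1).foldl (fun accx x =>
        (pvReach N (i - jh.1)).foldl (fun accy y =>
          let accy := ((accy.add (x + y)).add (x - y)).add (x * y)
          if y ≠ 0 then accy.add (PySem.Int.floordiv x y) else accy) accx) acc)
      (PySem.Set.ofList [pvRepB N i])
  termination_by i => i
  decreasing_by
  · have := jh.2; rw [List.mem_range'] at this; omega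
  · have := jh.2; rw [List.mem_range'] at this; omega

-- `for i in range(1, 9): if number in reach(i): return i` / `return -1`
def pvGoB (N : Int) (number : Int) : List Nat → Int
  | [] => -1
  | i :: rest =>
    if PySem.Set.contains (pvReach N i) number then (i : Int) else pvGoB N number rest

def solution_alt (N : Int) (number : Int) : Int :=
  if N = number then 1 else pvGoB N number (List.range' 1 8)

-- ===== PRECONDITION & SPEC =====
-- Pre_ excludes negative N with N ≠ number, on which A raises ValueError (int("-3-3") at level 2);
-- B raises the same ValueError there.
def Pre_solution (N : Int) (number : Int) : Prop := 0 ≤ N ∨ N = number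
instance (N : Int) (number : Int) : Decidable (Pre_solution N number) := by
  unfold Pre_solution; infer_instance

def pvWitness_solution : Int × Int := (5, 26)

def Spec_solution (N : Int) (number : Int) (out : Int) : Prop := out = solution_alt N number
instance (N : Int) (number : Int) (out : Int) : Decidable (Spec_solution N number out) := by
  unfold Spec_solution; infer_instance

-- ===== CLAIM (what is proved, stated in full; the proofs are below) =====
def Claim_equal_solution : Prop := ∀ (N : Int) (number : Int), Dom_solution N number → Pre_solution N number → Spec_solution N number (solution N number)

-- ===== LEMMAS AND PROOFS =====

-- the list of values Python appends/adds for one pair (x, y)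
def pvCombo (x y : Int) : List Int :=
  [x + y, x - y, x * y] ++ (if y ≠ 0 then [PySem.Int.floordiv x y] else [])

def pvCombos (xs ys : List Int) : List Int :=
  xs.flatMap (fun x => ys.flatMap (fun y => pvCombo x y))

theorem update_append {α : Type} [BEq α] (s : PySem.Set α) (l1 l2 : List α) :
    PySem.Set.update s (l1 ++ l2) = PySem.Set.update (PySem.Set.update s l1) l2 := by
  simp [PySem.Set.update, List.foldl_append]

theorem foldl_update_flatMap {α β : Type} [BEq α] (f : β → List α) :
    ∀ (ys : List β) (s : PySem.Set α),
      ys.foldl (fun s y => PySem.Set.update s (f y)) s = PySem.Set.update s (ys.flatMap f) := by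
  intro ys
  induction ys with
  | nil => intro s; simp [PySem.Set.update]
  | cons y ys ih => intro s; simp [List.foldl_cons, ih, List.flatMap_cons, update_append]

theorem foldl_append_flatMap {α β : Type} (f : β → List α) :
    ∀ (ys : List β) (acc : List α),
      ys.foldl (fun acc y => acc ++ f y) acc = acc ++ ys.flatMap f := by
  intro ys
  induction ys with
  | nil => simp
  | cons y ys ih => intro acc; simp [List.foldl_cons, ih, List.flatMap_cons]

-- A's level-i list is the base value followed by all combinations, flattened
theorem levelA_flat (N : Int) (dp : List (List Int)) (i : Int) :
    pvLevelA N dp i = pvRepA N i ::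
      (PySem.List.pyRange 1 i 1).flatMap
        (fun j => pvCombos (PySem.List.pyGetD dp j []) (PySem.List.pyGetD dp (i - j) [])) := by
  unfold pvLevelA
  have hy : ∀ (x : Int) (ys accx : List Int),
      ys.foldl (fun accy y =>
        let accy := accy ++ [x + y] ++ [x - y] ++ [x * y]
        if y ≠ 0 then accy ++ [PySem.Int.floordiv x y] else accy) accx
      = accx ++ ys.flatMap (fun y => pvCombo x y) := by
    intro x ys
    induction ys with
    | nil => simp
    | cons y ys ih =>
      intro accx
      simp only [List.foldl_cons, ih, List.flatMap_cons]
      by_cases h : y = 0 <;> simp [pvCombo, h]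
  have hx : ∀ (xs ys acc : List Int),
      xs.foldl (fun accx x =>
        ys.foldl (fun accy y =>
          let accy := accy ++ [x + y] ++ [x - y] ++ [x * y]
          if y ≠ 0 then accy ++ [PySem.Int.floordiv x y] else accy) accx) acc
      = acc ++ pvCombos xs ys := by
    intro xs ys
    induction xs with
    | nil => simp [pvCombos]
    | cons x xs ih =>
      intro acc
      simp only [List.foldl_cons, hy, pvCombos, List.flatMap_cons]
      simp [List.flatMap]
  have := foldl_append_flatMap
    (fun j => pvCombos (PySem.List.pyGetD dp j []) (PySem.List.pyGetD dp (i - j) []))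
    (PySem.List.pyRange 1 i 1) [pvRepA N i]
  calc (PySem.List.pyRange 1 i 1).foldl _ [pvRepA N i]
      = [pvRepA N i] ++ (PySem.List.pyRange 1 i 1).flatMap
          (fun j => pvCombos (PySem.List.pyGetD dp j []) (PySem.List.pyGetD dp (i - j) [])) := by
        rw [← this]
        exact List.foldl_ext _ _ _ (by intro acc j _; exact hx _ _ _)
    _ = _ := by simp

-- B's reach i is the base set updated with all combinations, flattened
theorem reach_flat (N : Int) (i : Nat) :
    pvReach N i = PySem.Set.update (PySem.Set.ofList [pvRepB N i])
      ((List.range' 1 (i - 1)).flatMap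
        (fun j => pvCombos (pvReach N j) (pvReach N (i - j)))) := by
  rw [pvReach]
  rw [List.foldl_attach (f := fun (acc : PySem.Set Int) (j : Nat) =>
    (pvReach N j).foldl (fun accx x =>
      (pvReach N (i - j)).foldl (fun accy y =>
        let accy := ((accy.add (x + y)).add (x - y)).add (x * y)
        if y ≠ 0 then accy.add (PySem.Int.floordiv x y) else accy) accx) acc)]
  have hy : ∀ (x : Int) (ys : List Int) (accx : PySem.Set Int),
      ys.foldl (fun accy y =>
        let accy := ((accy.add (x + y)).add (x - y)).add (x * y)
        if y ≠ 0 then accy.add (PySem.Int.floordiv x y) else accy) accx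
      = PySem.Set.update accx (ys.flatMap (fun y => pvCombo x y)) := by
    intro x ys
    induction ys with
    | nil => simp [PySem.Set.update]
    | cons y ys ih =>
      intro accx
      simp only [List.foldl_cons, ih, List.flatMap_cons, update_append]
      congr 1
      by_cases h : y = 0 <;> simp [pvCombo, h, PySem.Set.update]
  have hx : ∀ (xs ys : List Int) (acc : PySem.Set Int),
      xs.foldl (fun accx x =>
        ys.foldl (fun accy y =>
          let accy := ((accy.add (x + y)).add (x - y)).add (x * y)
          if y ≠ 0 then accy.add (PySem.Int.floordiv x y) else accy) accx) acc
      = PySem.Set.update acc (pvCombos xs ys) := by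
    intro xs ys acc
    rw [List.foldl_ext _ (fun accx x => PySem.Set.update accx (ys.flatMap (fun y => pvCombo x y)))
      acc (by intro a x _; exact hy x ys a)]
    exact foldl_update_flatMap (fun x => ys.flatMap (fun y => pvCombo x y)) xs acc
  calc ((List.range' 1 (i - 1)).foldl (fun acc j =>
        (pvReach N j).foldl (fun accx x =>
          (pvReach N (i - j)).foldl (fun accy y =>
            let accy := ((accy.add (x + y)).add (x - y)).add (x * y)
            if y ≠ 0 then accy.add (PySem.Int.floordiv x y) else accy) accx) acc)
        (PySem.Set.ofList [pvRepB N i]))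
      = (List.range' 1 (i - 1)).foldl
          (fun acc j => PySem.Set.update acc (pvCombos (pvReach N j) (pvReach N (i - j))))
          (PySem.Set.ofList [pvRepB N i]) := by
        exact List.foldl_ext _ _ _ (by intro acc j _; exact hx _ _ _)
    _ = _ := foldl_update_flatMap _ _ _

theorem rep_eq (N : Int) (k : Nat) : pvRepA N (k : Int) = pvRepB N k := by
  simp [pvRepA, pvRepB]

-- the key level equality: if dp holds reach 1 .. reach (k-1) at indices 1 .. k-1, then
-- A's deduplicated level k IS B's reach k (as lists, element for element)
theorem level_eq (N : Int) (dp : List (List Int)) (k : Nat) (hk : 1 ≤ k)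
    (hdp : ∀ m : Nat, 1 ≤ m → m < k → PySem.List.pyGetD dp (m : Int) [] = pvReach N m) :
    PySem.Set.ofList (pvLevelA N dp (k : Int)) = pvReach N k := by
  rw [levelA_flat, reach_flat]
  have hofl : ∀ (a : Int) (l : List Int),
      PySem.Set.ofList (a :: l) = PySem.Set.update (PySem.Set.ofList [a]) l := by
    intro a l
    simp [PySem.Set.ofList_eq_foldl, PySem.Set.update, List.foldl_cons]
  rw [hofl, rep_eq]
  congr 1
  -- the two index ranges enumerate the same j's, and the table lookups equal the recursive calls
  have hr : PySem.List.pyRange 1 (k : Int) 1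
      = (List.range' 1 (k - 1)).map (fun n : Nat => (n : Int)) := by
    rw [PySem.List.pyRange_one, List.range'_eq_map_range]
    have h1 : ((k : Int) - 1).toNat = k - 1 := by omega
    rw [h1]
    simp only [List.map_map]
    apply List.map_congr_left
    intro m hm
    simp only [Function.comp_apply]
    push_cast
    ring
  rw [hr, List.flatMap_map]
  apply List.flatMap_congr
  intro j hj
  rw [List.mem_range'] at hj
  obtain ⟨t, ht, hjt⟩ := hj
  have hj1 : 1 ≤ j := by omega
  have hjk : j < k := by omega
  have h1 : PySem.List.pyGetD dp (j : Int) [] = pvReach N j := hdp j hj1 hjk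
  have h2 : ((k : Int) - (j : Int)) = ((k - j : Nat) : Int) := by omega
  have h3 : PySem.List.pyGetD dp ((k : Int) - (j : Int)) [] = pvReach N (k - j) := by
    rw [h2]; exact hdp (k - j) (by omega) (by omega)
  rw [h1, h3]

-- the two outer loops agree step by step
theorem loop_eq (N number : Int) :
    ∀ (n : Nat) (k : Nat) (dp : List (List Int)), 9 - k ≤ n → 1 ≤ k → dp.length = 9 →
    (∀ m : Nat, 1 ≤ m → m < k → PySem.List.pyGetD dp (m : Int) [] = pvReach N m) →
    pvLoopA N number (PySem.List.pyRange (k : Int) 9 1) dp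
      = pvGoB N number (List.range' k (9 - k)) := by
  intro n
  induction n with
  | zero =>
    intro k dp hn hk _ _
    have hk9 : 9 ≤ k := by omega
    rw [PySem.List.pyRange_one_eq_nil (by exact_mod_cast hk9)]
    have : 9 - k = 0 := by omega
    rw [this]
    rfl
  | succ n ih =>
    intro k dp hn hk hlen hdp
    by_cases hk9 : 9 ≤ k
    · rw [PySem.List.pyRange_one_eq_nil (by exact_mod_cast hk9)]
      have : 9 - k = 0 := by omega
      rw [this]; rfl
    · have hklt : k < 9 := by omega
      rw [PySem.List.pyRange_one_cons (by exact_mod_cast hklt)]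
      have hrng : 9 - k = (9 - (k + 1)) + 1 := by omega
      rw [hrng, List.range'_succ]
      simp only [pvLoopA, pvGoB]
      have hlvl : PySem.Set.ofList (pvLevelA N dp (k : Int)) = pvReach N k :=
        level_eq N dp k hk hdp
      rw [hlvl]
      by_cases hmem : number ∈ pvReach N k
      · rw [if_pos hmem, if_pos (by rw [PySem.Set.contains_iff]; exact hmem)]
      · rw [if_neg hmem, if_neg (by rw [PySem.Set.contains_iff]; exact hmem)]
        have hcast : (k : Int) + 1 = ((k + 1 : Nat) : Int) := by push_cast; ring
        rw [hcast]
        apply ih (k + 1) _ (by omega) (by omega)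
          (by rw [PySem.List.length_pySetD]; exact hlen)
        intro m hm1 hmk
        have hk9' : k < dp.length := by omega
        rw [PySem.List.pyGetD_pySetD_natCast dp k m _ [] hk9']
        by_cases hmkeq : m = k
        · rw [if_pos hmkeq, hmkeq]
        · rw [if_neg hmkeq]
          exact hdp m hm1 (by omega)

theorem init_dp :
    ((List.range 9).foldl (fun d _ => d ++ [([] : List Int)]) []) = List.replicate 9 [] := by
  decide

-- ===== VERDICT (by name: the statement is the Claim_ definition above) =====
theorem solution_spec : Claim_equal_solution := by
  intro N number _ _
  unfold Spec_solution solution solution_alt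
  by_cases h : N = number
  · rw [if_pos h, if_pos h]
  · rw [if_neg h, if_neg h]
    have h9 : ((1 : Nat) : Int) = (1 : Int) := by norm_num
    have := loop_eq N number 8 1
      ((List.range 9).foldl (fun d _ => d ++ [([] : List Int)]) [])
      (by omega) (by omega)
      (by rw [init_dp]; simp)
      (by intro m hm1 hm; omega)
    rw [h9] at this
    exact this
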